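-- pv_equiv track=rewrite | github.com/sowiwia/IP-Algo1 | Guías/integradores_python.py | palabras_por_vocales
-- ===== SOURCE A (Python) =====
-- def texto_a_lista(texto:str) -> list[str]:
--     res: list[str] = []
--     espacio = " "
--     palabra = ""
--
--     for caracter in texto:
--         if caracter != espacio:
--             palabra += caracter
--         else:
--             if palabra != "":
--                 res.append(palabra)
--                 palabra = ""
--
--     if palabra != "":
--         res.append(palabra)
--
--     return res
--
-- def contar_vocales(texto: list[str], palabra: str) -> int:
--     res: int = 0
--     vocales: list[str] = ['a','e','i','o','u']
--
--     for elemento in texto: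
--         if elemento == palabra:
--             for caracter in elemento:
--                 if caracter in vocales:
--                     res += 1
--     return res
--
-- def cant_palabras_con_misma_cant_vocales(texto: list[str], palabra: str) -> int:
--     res: int = 0
--     cant_vocales_palabra = contar_vocales(texto, palabra)
--
--     for palabra2 in texto:
--         if contar_vocales(texto, palabra2) == cant_vocales_palabra:
--             res += 1
--
--     return res
--
-- def palabras_por_vocales(texto: str) -> dict[int, int]:
--     res: dict[int, int] = {}
--     palabras_separadas: list[str] = texto_a_lista(texto)
--
--     for palabra in palabras_separadas:
--         cantidad_de_vocales: int = contar_vocales(palabras_separadas,palabra)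
--         palabras_con_igual_cant_vocales: int = cant_palabras_con_misma_cant_vocales(palabras_separadas,palabra)
--
--         if cantidad_de_vocales not in res:
--             res[cantidad_de_vocales] = palabras_con_igual_cant_vocales
--
--     return res
-- ===== SOURCE B (Python) =====
-- def palabras_por_vocales(texto: str) -> dict[int, int]:
--     palabras = [w for w in texto.split(" ") if w]
--     mult = {}
--     for w in palabras:
--         mult[w] = mult.get(w, 0) + 1
--     clave = {w: sum(c in "aeiou" for c in w) * m for w, m in mult.items()}
--     claves = [clave[w] for w in palabras]
--     conteo = {}
--     for k in claves:
--         conteo[k] = conteo.get(k, 0) + 1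
--     res = {}
--     for k in claves:
--         if k not in res:
--             res[k] = conteo[k]
--     return res
-- ===== Notes on version B (the rewrite author's own statement) =====
-- stated objective: faster
-- what changed: B replaces A's nested rescans (for every word it re-walks the whole word list twice, itself calling a vowel-count that rescans the list) with one pass each: a multiplicity dict, a per-distinct-word key dict (vowels*multiplicity), a tally dict of keys, then one order-preserving pass building the result.
import Mathlib
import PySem

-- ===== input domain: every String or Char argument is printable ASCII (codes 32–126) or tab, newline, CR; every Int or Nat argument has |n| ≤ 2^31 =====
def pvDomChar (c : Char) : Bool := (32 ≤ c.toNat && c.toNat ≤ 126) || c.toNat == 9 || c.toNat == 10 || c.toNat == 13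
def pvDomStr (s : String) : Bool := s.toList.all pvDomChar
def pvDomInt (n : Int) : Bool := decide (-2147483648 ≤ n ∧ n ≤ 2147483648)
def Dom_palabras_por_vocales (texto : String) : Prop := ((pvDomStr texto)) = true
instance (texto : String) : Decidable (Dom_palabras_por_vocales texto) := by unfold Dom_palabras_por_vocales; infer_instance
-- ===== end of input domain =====

-- ===== PORT A =====
-- B replaces A's quadratic rescans with dictionaries built in one pass; same return value, measured faster.
def pvVocales : List Char := ['a', 'e', 'i', 'o', 'u']

def pvTextoALista (texto : List Char) : List (List Char) :=
  let st := texto.foldl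
    (fun (st : List (List Char) × List Char) caracter =>
      if caracter ≠ ' ' then (st.1, st.2 ++ [caracter])
      else if st.2 ≠ [] then (st.1 ++ [st.2], ([] : List Char)) else st)
    ([], [])
  if st.2 ≠ [] then st.1 ++ [st.2] else st.1

def pvContarVocales (texto : List (List Char)) (palabra : List Char) : Int :=
  texto.foldl
    (fun res elemento =>
      if elemento == palabra then
        elemento.foldl (fun r c => if pvVocales.contains c then r + 1 else r) res
      else res)
    0

def pvCantMisma (texto : List (List Char)) (palabra : List Char) : Int :=
  let cantVocalesPalabra := pvContarVocales texto palabra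
  texto.foldl
    (fun res palabra2 =>
      if pvContarVocales texto palabra2 == cantVocalesPalabra then res + 1 else res)
    0

def palabras_por_vocales (texto : String) : List (Int × Int) :=
  let palabrasSeparadas := pvTextoALista texto.toList
  (palabrasSeparadas.foldl
    (fun (res : PySem.Dict Int Int) palabra =>
      let cantidadDeVocales := pvContarVocales palabrasSeparadas palabra
      let palabrasConIgual := pvCantMisma palabrasSeparadas palabra
      if res.contains cantidadDeVocales then res
      else res.insert cantidadDeVocales palabrasConIgual)
    PySem.Dict.empty).items

-- ===== PORT B =====
-- sum(c in "aeiou" for c in w)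
def pvVow (w : List Char) : Int :=
  (w.map (fun c => if ("aeiou".toList).contains c then (1 : Int) else 0)).sum

def palabras_por_vocales_alt (texto : String) : List (Int × Int) :=
  -- texto.split(" ") ported as List.splitOn ' ' (Python's single-char split, empties kept), then the `if w` filter
  let palabras := (texto.toList.splitOn ' ').filter (fun w => w ≠ ([] : List Char))
  let mult := palabras.foldl
    (fun (d : PySem.Dict (List Char) Int) w => d.insert w (d.getD w 0 + 1)) PySem.Dict.empty
  let clave := mult.items.foldl
    (fun (d : PySem.Dict (List Char) Int) p => d.insert p.1 (pvVow p.1 * p.2)) PySem.Dict.empty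
  -- clave[w]: w is always a key of clave here, so getD's default is never read
  let claves := palabras.map (fun w => clave.getD w 0)
  let conteo := claves.foldl
    (fun (d : PySem.Dict Int Int) k => d.insert k (d.getD k 0 + 1)) PySem.Dict.empty
  (claves.foldl
    (fun (d : PySem.Dict Int Int) k =>
      if d.contains k then d else d.insert k (conteo.getD k 0))
    PySem.Dict.empty).items

-- ===== PRECONDITION & SPEC =====
def Spec_palabras_por_vocales (texto : String) (out : List (Int × Int)) : Prop := out = palabras_por_vocales_alt texto
instance (texto : String) (out : List (Int × Int)) : Decidable (Spec_palabras_por_vocales texto out) := by unfold Spec_palabras_por_vocales; infer_instance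

-- ===== CLAIM (what is proved, stated in full; the proofs are below) =====
def Claim_equal_palabras_por_vocales : Prop := ∀ (texto : String), Dom_palabras_por_vocales texto → Spec_palabras_por_vocales texto (palabras_por_vocales texto)

-- ===== LEMMAS AND PROOFS =====

theorem pv_modifyHead_triv (l : List (List Char)) :
    l.modifyHead (fun h => h) = l := by
  cases l <;> rfl

-- A's split loop equals splitOn-then-filter, generalized over the running accumulator.
theorem pv_split_aux (cs : List Char) : ∀ (acc : List (List Char)) (cur : List Char),
    (if (cs.foldl (fun (st : List (List Char) × List Char) caracter =>
          if caracter ≠ ' ' then (st.1, st.2 ++ [caracter])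
          else if st.2 ≠ [] then (st.1 ++ [st.2], ([] : List Char)) else st) (acc, cur)).2 ≠ []
      then (cs.foldl (fun (st : List (List Char) × List Char) caracter =>
          if caracter ≠ ' ' then (st.1, st.2 ++ [caracter])
          else if st.2 ≠ [] then (st.1 ++ [st.2], ([] : List Char)) else st) (acc, cur)).1
        ++ [(cs.foldl (fun (st : List (List Char) × List Char) caracter =>
          if caracter ≠ ' ' then (st.1, st.2 ++ [caracter])
          else if st.2 ≠ [] then (st.1 ++ [st.2], ([] : List Char)) else st) (acc, cur)).2]
      else (cs.foldl (fun (st : List (List Char) × List Char) caracter =>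
          if caracter ≠ ' ' then (st.1, st.2 ++ [caracter])
          else if st.2 ≠ [] then (st.1 ++ [st.2], ([] : List Char)) else st) (acc, cur)).1)
    = acc ++ (((cs.splitOn ' ').modifyHead (fun h => cur ++ h)).filter (fun w => w ≠ [])) := by
  induction cs with
  | nil =>
    intro acc cur
    by_cases h : cur = [] <;>
      simp [List.splitOn, List.splitOnP_nil, h]
  | cons c cs ih =>
    intro acc cur
    by_cases hc : c = ' '
    · subst hc
      by_cases h : cur = []
      · subst h
        rw [List.foldl_cons]
        simp only [ne_eq, not_true_eq_false, if_false]
        rw [ih acc []]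
        simp only [List.splitOn, List.splitOnP_cons]
        simp [pv_modifyHead_triv]
      · rw [List.foldl_cons]
        simp only [ne_eq, not_true_eq_false, if_false, if_pos h]
        rw [ih (acc ++ [cur]) []]
        simp only [List.splitOn, List.splitOnP_cons]
        simp [pv_modifyHead_triv, h]
    · rw [List.foldl_cons]
      simp only [ne_eq, hc, not_false_eq_true, if_pos]
      rw [ih acc (cur ++ [c])]
      have hsplit : List.splitOn ' ' (c :: cs)
          = (List.splitOn ' ' cs).modifyHead (List.cons c) := by
        simp [List.splitOn, List.splitOnP_cons, hc]
      rw [hsplit, List.modifyHead_modifyHead]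
      have hfun : ((fun h => cur ++ h) ∘ List.cons c) = fun h : List Char => cur ++ [c] ++ h := by
        funext h
        simp
      rw [hfun]

theorem pv_textoALista_eq (cs : List Char) :
    pvTextoALista cs = ((cs.splitOn ' ').filter (fun w => w ≠ ([] : List Char))) := by
  have h := pv_split_aux cs [] []
  simp only [List.nil_append] at h
  unfold pvTextoALista
  rw [h]
  exact congrArg (List.filter _) (pv_modifyHead_triv _)

-- A's inner vowel loop, generalized over its accumulator
theorem pv_vowfold (w : List Char) : ∀ (a : Int),
    w.foldl (fun r c => if pvVocales.contains c then r + 1 else r) a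
      = a + (w.countP (fun c => pvVocales.contains c) : Int) :=
  fun a => PySem.List.foldl_count_if _ w a

theorem pv_contar_eq (lst : List (List Char)) (p : List Char) :
    pvContarVocales lst p
      = (lst.count p : Int) * (p.countP (fun c => pvVocales.contains c) : Int) := by
  unfold pvContarVocales
  have aux : ∀ (l : List (List Char)) (a : Int),
      l.foldl (fun res elemento =>
          if elemento == p then
            elemento.foldl (fun r c => if pvVocales.contains c then r + 1 else r) res
          else res) a
        = a + (l.count p : Int) * (p.countP (fun c => pvVocales.contains c) : Int) := by
    intro l
    induction l with
    | nil => intro a; simp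
    | cons e l ihl =>
      intro a
      rw [List.foldl_cons]
      by_cases he : (e == p) = true
      · have hep : e = p := by exact eq_of_beq he
        rw [if_pos he, pv_vowfold, ihl, hep, List.count_cons_self]
        push_cast
        ring
      · rw [if_neg he, ihl, List.count_cons_of_ne]
        intro hep
        exact he (by simp [hep])
  rw [aux lst 0, zero_add]

theorem pv_vow_eq (w : List Char) :
    pvVow w = (w.countP (fun c => pvVocales.contains c) : Int) := by
  unfold pvVow
  rw [show "aeiou".toList = pvVocales from rfl]
  exact PySem.List.sum_map_ite_one_zero _ w

theorem pv_cant_eq (lst : List (List Char)) (p : List Char) :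
    pvCantMisma lst p = ((lst.map (pvContarVocales lst)).count (pvContarVocales lst p) : Int) := by
  unfold pvCantMisma
  rw [PySem.List.foldl_count_if, zero_add, List.count_eq_countP, List.countP_map]
  rfl

theorem pv_getD_fold_not_mem {κ ν : Type} [BEq κ] [LawfulBEq κ] (f : κ → ν) :
    ∀ (l : List κ) (d : PySem.Dict κ ν) (w : κ) (dflt : ν), w ∉ l →
      (l.foldl (fun d k => d.insert k (f k)) d).getD w dflt = d.getD w dflt := by
  intro l
  induction l with
  | nil => intro d w dflt _; rfl
  | cons k l ih =>
    intro d w dflt hw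
    have hwl : w ∉ l := fun h => hw (List.mem_cons_of_mem _ h)
    have hwk : w ≠ k := fun h => hw (by simp [h])
    rw [List.foldl_cons, ih _ _ _ hwl, PySem.Dict.getD_insert_of_ne _ _ _ hwk]

theorem pv_getD_fold_mem {κ ν : Type} [BEq κ] [LawfulBEq κ] (f : κ → ν) :
    ∀ (l : List κ) (d : PySem.Dict κ ν) (w : κ) (dflt : ν), w ∈ l →
      (l.foldl (fun d k => d.insert k (f k)) d).getD w dflt = f w := by
  intro l
  induction l with
  | nil => intro d w dflt hw; cases hw
  | cons k l ih =>
    intro d w dflt hw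
    rw [List.foldl_cons]
    by_cases hm : w ∈ l
    · exact ih _ _ _ hm
    · have hwk : w = k := by
        rcases List.mem_cons.mp hw with h | h
        · exact h
        · exact absurd h hm
      rw [pv_getD_fold_not_mem _ _ _ _ _ hm, hwk, PySem.Dict.getD_insert_self]

theorem pv_eq (texto : String) : palabras_por_vocales texto = palabras_por_vocales_alt texto := by
  unfold palabras_por_vocales palabras_por_vocales_alt
  dsimp only
  rw [pv_textoALista_eq]
  set qs := ((texto.toList.splitOn ' ').filter (fun w => w ≠ ([] : List Char))) with hqs
  -- B side: mult is a counter, whose items list the distinct words with their multiplicities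
  rw [PySem.Dict.foldl_insert_getD_add_one_eq_counter (xs := qs), PySem.Dict.items_counter]
  -- claves = qs.map (pvContarVocales qs)
  have hmap :
      List.map (fun w =>
        (List.foldl (fun (d : PySem.Dict (List Char) Int) p => d.insert p.1 (pvVow p.1 * p.2))
          PySem.Dict.empty
          (List.map (fun k => (k, (List.count k qs : Int))) (PySem.Set.ofList qs))).getD w 0) qs
        = List.map (pvContarVocales qs) qs := by
    apply List.map_congr_left
    intro w hw
    rw [List.foldl_map]
    dsimp only
    rw [pv_getD_fold_mem (fun k => pvVow k * (List.count k qs : Int)) _ _ _ _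
      ((PySem.Set.mem_ofList qs w).mpr hw)]
    rw [pv_vow_eq, pv_contar_eq]
    ring
  rw [hmap,
    PySem.Dict.foldl_insert_getD_add_one_eq_counter (xs := qs.map (pvContarVocales qs)),
    List.foldl_map]
  -- A side: replace pvCantMisma with the counter lookup
  congr 1
  apply PySem.List.foldl_congr_mem
  intro acc w _
  have hc : pvCantMisma qs w
      = (PySem.Dict.counter (qs.map (pvContarVocales qs))).getD (pvContarVocales qs w) 0 := by
    rw [PySem.Dict.getD_counter, pv_cant_eq]
  rw [hc]

-- ===== VERDICT (by name: the statement is the Claim_ definition above) =====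
theorem palabras_por_vocales_spec : Claim_equal_palabras_por_vocales := by
  intro texto _
  unfold Spec_palabras_por_vocales
  exact pv_eq texto
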